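-- pv_equiv track=rewrite | github.com/yosuanicolaus/competitive-programming | codeforces_python/B_Spreadsheets.py | column_to_rxcy
-- ===== SOURCE A (Python) =====
-- def get_col_num_equivalent(col: str):
--     return ord(col) - ord("A") + 1
--
-- def column_to_rxcy(column: str):
--     for row_idx, ch in enumerate(column):
--         if ch in "123456789":
--             ans_row = int(column[row_idx:])
--             ans_col = 0
--             factor = 0
--
--             for col_idx in range(row_idx - 1, -1, -1):
--                 ans_col += 26**factor * get_col_num_equivalent(column[col_idx])
--                 factor += 1
--
--             return f"R{ans_row}C{ans_col}"
-- ===== SOURCE B (Python) =====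
-- def column_to_rxcy(column: str):
--     # stage 1: locate the first digit 1-9
--     split = None
--     for i, ch in enumerate(column):
--         if ch in "123456789":
--             split = i
--             break
--     if split is None:
--         return None
--     # stage 2: forward Horner pass over the letter prefix
--     ans_col = 0
--     for c in column[:split]:
--         ans_col = ans_col * 26 + ord(c) - ord("A") + 1
--     # stage 3: the rest of the string is the row number
--     return f"R{int(column[split:])}C{ans_col}"
-- ===== Notes on version B (the rewrite author's own statement) =====
-- stated objective: simpler
-- what changed: A's single scan with a nested reverse power-of-26 loop is replaced by three staged passes: find the split point at the first digit 1-9, then compute the column value with a forward Horner pass over the letter prefix (no exponentiation, no reverse index loop), then parse the remainder as the row number.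
import Mathlib
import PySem

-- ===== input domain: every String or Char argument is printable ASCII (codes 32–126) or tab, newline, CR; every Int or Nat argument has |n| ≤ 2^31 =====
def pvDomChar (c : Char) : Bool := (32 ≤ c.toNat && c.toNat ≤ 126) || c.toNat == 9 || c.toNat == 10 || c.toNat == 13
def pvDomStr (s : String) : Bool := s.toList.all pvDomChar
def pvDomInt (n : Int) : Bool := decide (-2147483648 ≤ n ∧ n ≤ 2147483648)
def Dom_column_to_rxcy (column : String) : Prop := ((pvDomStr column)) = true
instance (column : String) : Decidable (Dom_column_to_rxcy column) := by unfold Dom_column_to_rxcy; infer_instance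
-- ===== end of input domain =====

-- B replaces A's scan with a nested reverse power-of-26 loop by three staged passes:
-- find the split point, forward Horner pass over the prefix, parse the rest (simpler; same result).

-- ===== PORT A =====
-- ch in "123456789"  (ch is a single character, so substring membership = character membership)
def pvIsRowDigit (ch : Char) : Bool := ['1','2','3','4','5','6','7','8','9'].contains ch

-- ord(col) - ord("A") + 1
def pvColNum (c : Char) : Int := (c.toNat : Int) - 65 + 1

def pvALoop (cs : List Char) : List (Int × Char) → Option String
  | [] => none
  | (i, ch) :: rest =>
    if pvIsRowDigit ch then
      -- int(column[row_idx:]); Python raises ValueError when ofChars? = none (excluded by Pre_)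
      match PySem.Int.ofChars? (PySem.List.slice cs (some i) none) with
      | none => none
      | some ansRow =>
        -- for col_idx in range(row_idx-1, -1, -1): ans_col += 26**factor * …; factor += 1
        let st := (PySem.List.pyRange (i - 1) (-1) (-1)).foldl
          (fun (st : Int × Nat) j =>
            (st.1 + 26 ^ st.2 * pvColNum (PySem.List.pyGetD cs j ' '), st.2 + 1)) (0, 0)
        some ("R" ++ PySem.Int.toStr ansRow ++ "C" ++ PySem.Int.toStr st.1)
    else pvALoop cs rest

def column_to_rxcy (column : String) : Option String :=
  pvALoop column.toList (PySem.List.enumerate column.toList 0)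

-- ===== PORT B =====
-- stage 1: locate the first digit 1-9 (the for/break loop)
def pvFindSplit : List Char → Nat → Option Nat
  | [], _ => none
  | ch :: rest, i => if pvIsRowDigit ch then some i else pvFindSplit rest (i + 1)

-- stages 2 and 3: Horner pass over column[:split], then int(column[split:])
def pvFinish (cs : List Char) (split : Nat) : Option String :=
  let ansCol := (PySem.List.slice cs none (some (split : Int))).foldl
      (fun a c => a * 26 + ((c.toNat : Int) - 65 + 1)) 0
  match PySem.Int.ofChars? (PySem.List.slice cs (some (split : Int)) none) with
  | none => none
  | some r => some ("R" ++ PySem.Int.toStr r ++ "C" ++ PySem.Int.toStr ansCol)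

def column_to_rxcy_alt (column : String) : Option String :=
  match pvFindSplit column.toList 0 with
  | none => none
  | some split => pvFinish column.toList split

-- ===== PRECONDITION & SPEC =====
-- Pre_ excludes exactly the inputs where int(column[row_idx:]) raises ValueError (non-int junk
-- after the first 1-9 digit); both A and B raise there.
def Pre_column_to_rxcy (column : String) : Prop :=
  let cs := column.toList
  let k := cs.findIdx pvIsRowDigit
  k < cs.length → (PySem.Int.ofChars? (cs.drop k)).isSome
instance (column : String) : Decidable (Pre_column_to_rxcy column) := by unfold Pre_column_to_rxcy; infer_instance
def pvWitness_column_to_rxcy : String := "BC23"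

def Spec_column_to_rxcy (column : String) (out : Option String) : Prop := out = column_to_rxcy_alt column
instance (column : String) (out : Option String) : Decidable (Spec_column_to_rxcy column out) := by unfold Spec_column_to_rxcy; infer_instance

-- ===== CLAIM (what is proved, stated in full; the proofs are below) =====
def Claim_equal_column_to_rxcy : Prop := ∀ (column : String), Dom_column_to_rxcy column → Pre_column_to_rxcy column → Spec_column_to_rxcy column (column_to_rxcy column)

-- ===== LEMMAS AND PROOFS =====

-- B's running accumulator after consuming the prefix
def pvHorner (l : List Char) : Int :=
  l.foldl (fun a c => a * 26 + ((c.toNat : Int) - 65 + 1)) 0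

-- the values [0..n-1] read from cs are exactly the prefix of cs
lemma pv_map_pyGetD_range (cs : List Char) (n : Nat) (h : n ≤ cs.length) :
    (PySem.List.pyRange 0 n 1).map (fun j => PySem.List.pyGetD cs j ' ') = cs.take n := by
  induction n with
  | zero => simp
  | succ m ih =>
    rw [show ((m + 1 : Nat) : Int) = (m : Int) + 1 by push_cast; ring,
        PySem.List.pyRange_one_succ_right (by positivity)]
    have hm : m < cs.length := h
    rw [List.map_append, ih (Nat.le_of_succ_le h), List.take_add_one]
    simp [PySem.List.pyGetD_natCast, List.getD_eq_getElem?_getD, List.getElem?_eq_getElem hm]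

-- reverse power-sum loop = Horner
lemma pv_powsum_eq_horner (l : List Int) (acc : Int) (k : Nat) :
    (l.foldl (fun (st : Int × Nat) v => (st.1 + 26 ^ st.2 * v, st.2 + 1)) (acc, k)).1
      = acc + 26 ^ k * (l.reverse.foldl (fun a v => a * 26 + v) 0) := by
  induction l generalizing acc k with
  | nil => simp
  | cons v t ih =>
    simp only [List.foldl_cons, List.reverse_cons, List.foldl_append, List.foldl_cons,
      List.foldl_nil, ih]
    rw [pow_succ]
    ring

-- A's inner power-of-26 loop over indices k-1 … 0 computes B's Horner value of the prefix
lemma pv_inner_eq_horner (cs : List Char) (k : Nat) (h : k ≤ cs.length) :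
    ((PySem.List.pyRange ((k : Int) - 1) (-1) (-1)).foldl
        (fun (st : Int × Nat) j =>
          (st.1 + 26 ^ st.2 * pvColNum (PySem.List.pyGetD cs j ' '), st.2 + 1)) (0, 0)).1
      = pvHorner (cs.take k) := by
  have hrev : PySem.List.pyRange ((k : Int) - 1) (-1) (-1)
      = (PySem.List.pyRange 0 (k : Int) 1).reverse := by
    rw [PySem.List.pyRange_neg_one_eq_reverse]; norm_num
  have hm : (PySem.List.pyRange 0 (k : Int) 1).map
        (fun j => pvColNum (PySem.List.pyGetD cs j ' ')) = (cs.take k).map pvColNum := by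
    rw [← pv_map_pyGetD_range cs k h, List.map_map]; rfl
  rw [hrev,
      ← List.foldl_map (f := fun j => pvColNum (PySem.List.pyGetD cs j ' '))
        (g := fun (st : Int × Nat) v => (st.1 + 26 ^ st.2 * v, st.2 + 1)),
      List.map_reverse, hm, pv_powsum_eq_horner, List.reverse_reverse, List.foldl_map]
  simp [pvHorner, pvColNum]

-- main invariant: A's remaining enumerate-scan from position k returns none when no
-- digit remains, and otherwise equals B's staged finish at the index stage 1 finds
lemma pv_loop_eq (cs : List Char) (t : List Char) (k : Nat) (hdrop : cs.drop k = t) :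
    pvALoop cs (PySem.List.enumerate t (k : Int)) =
      match pvFindSplit t k with
      | none => none
      | some i => pvFinish cs i := by
  induction t generalizing k with
  | nil => simp [PySem.List.enumerate_nil, pvALoop, pvFindSplit]
  | cons ch rest ih =>
    have hk : k < cs.length := by
      by_contra h
      simp [List.drop_eq_nil_of_le (le_of_not_gt h)] at hdrop
    rw [PySem.List.enumerate_cons]
    simp only [pvALoop, pvFindSplit]
    split
    · -- digit found at index k: A's branch = pvFinish cs k
      show _ = pvFinish cs k
      unfold pvFinish
      cases h : PySem.Int.ofChars? (PySem.List.slice cs (some (k : Int)) none) with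
      | none => simp [h]
      | some r =>
        have hcol := pv_inner_eq_horner cs k (le_of_lt hk)
        simp only [h, PySem.List.slice_to_natCast, hcol, pvHorner]
    · have hdrop' : cs.drop (k + 1) = rest := by
        rw [← List.drop_drop, hdrop]; rfl
      have := ih (k + 1) hdrop'
      rw [show ((k : Int) + 1) = ((k + 1 : Nat) : Int) by push_cast; ring] at *
      exact this

-- ===== VERDICT (by name: the statement is the Claim_ definition above) =====
theorem column_to_rxcy_spec : Claim_equal_column_to_rxcy := by
  intro column _ _
  unfold Spec_column_to_rxcy column_to_rxcy column_to_rxcy_alt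
  exact pv_loop_eq column.toList column.toList 0 (by simp)
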